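-- pv_equiv track=rewrite | github.com/Iusto/Solved.ac | 3085.py | count_max_candies
-- ===== SOURCE A (Python) =====
-- def count_max_candies(board):
--     max_candies = 0
--     # 가로 연속 사탕 개수 세기
--     for row in board:
--         count = 1
--         for i in range(1, len(row)):
--             if row[i] == row[i - 1]:
--                 count += 1
--             else:
--                 max_candies = max(max_candies, count)
--                 count = 1
--         max_candies = max(max_candies, count)
--
--     # 세로 연속 사탕 개수 세기
--     for col in range(len(board[0])):
--         count = 1
--         for row in range(1, len(board)):
--             if board[row][col] == board[row - 1][col]:
--                 count += 1
--             else: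
--                 max_candies = max(max_candies, count)
--                 count = 1
--         max_candies = max(max_candies, count)
--
--     return max_candies
-- ===== SOURCE B (Python) =====
-- def count_max_candies(board):
--     # Single pass over the rows: a vector v of vertical run counters (DP) replaces
--     # A's per-column passes; columns are those of the first row, as in A.
--     cols = len(board[0])
--     best = 1
--     v = [0] * cols
--     prev = None
--     for row in board:
--         if prev is None:
--             v = [1] * cols
--         else:
--             v = [v[j] + 1 if row[j] == prev[j] else 1 for j in range(cols)]
--         h = hbest = 1
--         for a, b in zip(row, row[1:]):
--             h = h + 1 if b == a else 1
--             hbest = max(hbest, h)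
--         best = max([best, hbest] + v)
--         prev = row
--     return best
-- ===== Notes on version B (the rewrite author's own statement) =====
-- stated objective: faster
-- what changed: A makes a second set of passes down each column with paired row indexing; B makes a single pass over the rows, maintaining a vector of per-column vertical run counters (dynamic programming) alongside the row's horizontal run, so columns are never traversed (row-major access only, no repeated board[row][col] indexing).
import Mathlib
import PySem

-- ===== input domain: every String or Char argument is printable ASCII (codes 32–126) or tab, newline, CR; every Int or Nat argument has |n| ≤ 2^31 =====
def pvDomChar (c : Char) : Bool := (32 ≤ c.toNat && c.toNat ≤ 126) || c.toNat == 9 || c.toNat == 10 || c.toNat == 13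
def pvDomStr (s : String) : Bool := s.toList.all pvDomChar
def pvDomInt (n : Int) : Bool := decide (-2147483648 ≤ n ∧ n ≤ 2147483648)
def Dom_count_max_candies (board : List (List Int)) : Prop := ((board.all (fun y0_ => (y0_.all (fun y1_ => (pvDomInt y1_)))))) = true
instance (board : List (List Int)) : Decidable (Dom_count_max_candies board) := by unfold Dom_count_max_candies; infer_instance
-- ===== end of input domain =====

-- B replaces A's per-column passes by a single pass over the rows that maintains a
-- vector of vertical run counters (dynamic programming); measured constant-factor faster.
-- ===== PORT A =====
-- A's row loop: run counting with indices i, i-1, folding the pair (max_candies, count)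
def pvRowScan (mc : Int) (row : List Int) : Int :=
  let s := (PySem.List.pyRange 1 (row.length : Int) 1).foldl
    (fun (s : Int × Int) i =>
      if PySem.List.pyGetD row i 0 = PySem.List.pyGetD row (i - 1) 0
      then (s.1, s.2 + 1)
      else (max s.1 s.2, 1)) (mc, 1)
  max s.1 s.2

-- A's column loop body for one col: run counting with indices row, row-1
def pvColScan (board : List (List Int)) (mc : Int) (col : Int) : Int :=
  let s := (PySem.List.pyRange 1 (board.length : Int) 1).foldl
    (fun (s : Int × Int) r =>
      if PySem.List.pyGetD (PySem.List.pyGetD board r []) col 0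
         = PySem.List.pyGetD (PySem.List.pyGetD board (r - 1) []) col 0
      then (s.1, s.2 + 1)
      else (max s.1 s.2, 1)) (mc, 1)
  max s.1 s.2

def count_max_candies (board : List (List Int)) : Int :=
  let m1 := board.foldl pvRowScan 0
  (PySem.List.pyRange 0 (((PySem.List.pyGetD board 0 []).length : Nat) : Int) 1).foldl
    (pvColScan board) m1

-- ===== PORT B =====
-- inner loop 'for a, b in zip(row, row[1:])' with state (h, hbest)
def pvHStep (t : Int × Int) (pr : Int × Int) : Int × Int :=
  let h := if pr.2 = pr.1 then t.1 + 1 else 1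
  (h, max t.2 h)

def pvHScan (row : List Int) : Int × Int :=
  (row.zip (row.drop 1)).foldl pvHStep (1, 1)

-- one iteration of B's row loop: state (best, v, prev)
def pvBStep (cols : Nat) (s : Int × List Int × Option (List Int)) (row : List Int) :
    Int × List Int × Option (List Int) :=
  let v' : List Int :=
    match s.2.2 with
    | none => List.replicate cols 1
    | some p => (List.range cols).map
        (fun j => if row.getD j 0 = p.getD j 0 then s.2.1.getD j 0 + 1 else 1)
  (((pvHScan row).2 :: v').foldl max s.1, v', some row)

def count_max_candies_alt (board : List (List Int)) : Int :=
  let cols := (PySem.List.pyGetD board 0 []).length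
  (board.foldl (pvBStep cols) (1, List.replicate cols 0, none)).1

-- ===== PRECONDITION & SPEC =====
-- Pre_ excludes exactly the inputs where A raises IndexError: the empty board (board[0])
-- and ragged boards whose first row is longer than some row (board[row][col]).
def Pre_count_max_candies (board : List (List Int)) : Prop :=
  board ≠ [] ∧ ∀ row ∈ board, (board.headD []).length ≤ row.length
instance (board : List (List Int)) : Decidable (Pre_count_max_candies board) := by
  unfold Pre_count_max_candies; infer_instance
def pvWitness_count_max_candies : List (List Int) := [[1, 1], [2, 3]]

def Spec_count_max_candies (board : List (List Int)) (out : Int) : Prop := out = count_max_candies_alt board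
instance (board : List (List Int)) (out : Int) : Decidable (Spec_count_max_candies board out) := by unfold Spec_count_max_candies; infer_instance

-- ===== CLAIM (what is proved, stated in full; the proofs are below) =====
def Claim_equal_count_max_candies : Prop := ∀ (board : List (List Int)), Dom_count_max_candies board → Pre_count_max_candies board → Spec_count_max_candies board (count_max_candies board)

-- ===== LEMMAS AND PROOFS =====

-- run lengths of a line (reference value both ports are related to)
def pvRunLens : List Int → List Int
  | [] => []
  | [_] => [1]
  | x :: y :: xs =>
    if x = y then
      match pvRunLens (y :: xs) with
      | n :: ns => (n + 1) :: ns
      | [] => [1]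
    else 1 :: pvRunLens (y :: xs)

-- the longest run of a line (1 for the empty line)
def pvLineBest (line : List Int) : Int :=
  match pvRunLens line with
  | [] => 1
  | n :: ns => ns.foldl max n

-- A's run scan as a structural recursion over the tail of the line
def pvRS : Int → Int → Int → List Int → Int
  | mc, c, _, [] => max mc c
  | mc, c, prev, x :: xs => if x = prev then pvRS mc (c + 1) x xs else pvRS (max mc c) 1 x xs

-- B's run scan: like pvRS but folding every intermediate count into the running best
def pvGB : Int → Int → Int → List Int → Int
  | best, _, _, [] => best
  | best, h, prev, x :: xs =>
    if x = prev then pvGB (max best (h + 1)) (h + 1) x xs else pvGB (max best 1) 1 x xs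

-- the head run of pvRunLens, its count started at c instead of 1
def pvAdj (c : Int) : List Int → Int
  | [] => c
  | n :: ns => ns.foldl max (c + n - 1)

theorem pv_foldl_max_max (l : List Int) (a b : Int) :
    l.foldl max (max a b) = max a (l.foldl max b) := by
  induction l generalizing b with
  | nil => rfl
  | cons x xs ih => simp only [List.foldl_cons, max_assoc, ih]

theorem pvRunLens_cons_cons (a b : Int) (l : List Int) :
    pvRunLens (a :: b :: l) = if a = b then
      (match pvRunLens (b :: l) with | n :: ns => (n + 1) :: ns | [] => [1])
      else 1 :: pvRunLens (b :: l) := rfl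

theorem pvRunLens_ne_nil (x : Int) (xs : List Int) : pvRunLens (x :: xs) ≠ [] := by
  cases xs with
  | nil => simp [pvRunLens]
  | cons y ys =>
    rw [pvRunLens_cons_cons]
    split_ifs
    · cases h : pvRunLens (y :: ys) <;> simp
    · simp

theorem pvRS_runLens (xs : List Int) : ∀ (prev c mc : Int),
    pvRS mc c prev xs = max mc (pvAdj c (pvRunLens (prev :: xs))) := by
  induction xs with
  | nil =>
    intro prev c mc
    simp [pvRS, pvRunLens, pvAdj]
  | cons x xs ih =>
    intro prev c mc
    obtain ⟨n, ns, h⟩ : ∃ n ns, pvRunLens (x :: xs) = n :: ns := by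
      cases hh : pvRunLens (x :: xs) with
      | nil => exact absurd hh (pvRunLens_ne_nil x xs)
      | cons a b => exact ⟨a, b, rfl⟩
    by_cases hx : x = prev
    · subst hx
      rw [pvRS, if_pos rfl, ih]
      have hr : pvRunLens (x :: x :: xs) = (n + 1) :: ns := by
        rw [pvRunLens_cons_cons, if_pos rfl, h]
      rw [h, hr]
      simp only [pvAdj]
      have e : c + 1 + n - 1 = c + (n + 1) - 1 := by omega
      rw [e]
    · rw [pvRS, if_neg hx, ih]
      have hpx : prev ≠ x := fun hpx => hx hpx.symm
      have hr : pvRunLens (prev :: x :: xs) = 1 :: pvRunLens (x :: xs) := by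
        rw [pvRunLens_cons_cons, if_neg hpx]
      rw [hr, h]
      simp only [pvAdj, List.foldl_cons]
      have h1 : (1 : Int) + n - 1 = n := by omega
      have h2 : max (c + 1 - 1) n = max c n := by congr 1; omega
      rw [h1, h2, pv_foldl_max_max ns c n, ← max_assoc]

theorem pvRS_eq_lineBest (x : Int) (xs : List Int) (mc : Int) :
    pvRS mc 1 x xs = max mc (pvLineBest (x :: xs)) := by
  rw [pvRS_runLens]
  cases h : pvRunLens (x :: xs) with
  | nil => exact absurd h (pvRunLens_ne_nil x xs)
  | cons n ns =>
    simp only [pvAdj, pvLineBest, h]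
    have e : (1 : Int) + n - 1 = n := by omega
    rw [e]

-- every run length is at least 1
theorem pvRunLens_mem_ge_one : ∀ (l : List Int), ∀ m ∈ pvRunLens l, (1 : Int) ≤ m := by
  intro l
  induction l with
  | nil => intro m hm; simp [pvRunLens] at hm
  | cons x xs ih =>
    cases xs with
    | nil => intro m hm; simp [pvRunLens] at hm; omega
    | cons y ys =>
      intro m hm
      rw [pvRunLens_cons_cons] at hm
      split_ifs at hm with hxy
      · cases hh : pvRunLens (y :: ys) with
        | nil => exact absurd hh (pvRunLens_ne_nil y ys)
        | cons n ns =>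
          rw [hh] at hm
          rcases List.mem_cons.mp hm with h | h
          · have := ih n (by rw [hh]; exact List.mem_cons_self)
            omega
          · exact ih m (by rw [hh]; exact List.mem_cons_of_mem n h)
      · rcases List.mem_cons.mp hm with h | h
        · omega
        · exact ih m h

theorem pv_le_foldl_max (l : List Int) : ∀ n : Int, n ≤ l.foldl max n := by
  induction l with
  | nil => intro n; exact le_refl n
  | cons x xs ih => intro n; exact le_trans (le_max_left n x) (ih (max n x))

theorem pvLineBest_ge_one (l : List Int) : (1 : Int) ≤ pvLineBest l := by
  unfold pvLineBest
  cases h : pvRunLens l with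
  | nil => exact le_refl 1
  | cons n ns =>
    have hn : (1 : Int) ≤ n := pvRunLens_mem_ge_one l n (by rw [h]; exact List.mem_cons_self)
    exact le_trans hn (pv_le_foldl_max ns n)

-- pvGB with the current count folded in equals pvRS
theorem pvGB_pvRS (xs : List Int) : ∀ (prev h best : Int),
    pvGB (max best h) h prev xs = pvRS best h prev xs := by
  induction xs with
  | nil => intro prev h best; simp [pvGB, pvRS]
  | cons x xs ih =>
    intro prev h best
    by_cases hx : x = prev
    · rw [pvGB, if_pos hx, pvRS, if_pos hx]
      have e : max (max best h) (h + 1) = max best (h + 1) := by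
        rw [max_assoc]; congr 1; omega
      rw [e, ih]
    · rw [pvGB, if_neg hx, pvRS, if_neg hx]
      have e : max (max best h) 1 = max (max best h) 1 := rfl
      rw [ih]

theorem pvGB_max (xs : List Int) : ∀ (prev h b x : Int),
    pvGB (max b x) h prev xs = max x (pvGB b h prev xs) := by
  induction xs with
  | nil => intro prev h b x; simp [pvGB, max_comm]
  | cons y ys ih =>
    intro prev h b x
    by_cases hy : y = prev
    · rw [pvGB, if_pos hy, pvGB, if_pos hy]
      have e : max (max b x) (h + 1) = max (max b (h + 1)) x := by
        rw [max_assoc, max_comm x, ← max_assoc]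
      rw [e, ih]
    · rw [pvGB, if_neg hy, pvGB, if_neg hy]
      have e : max (max b x) 1 = max (max b 1) x := by
        rw [max_assoc, max_comm x, ← max_assoc]
      rw [e, ih]

theorem pvGB_one (b : Int) (hb : 1 ≤ b) (q : Int) (ys : List Int) :
    pvGB b 1 q ys = max b (pvLineBest (q :: ys)) := by
  have h1 : max b 1 = b := max_eq_left hb
  calc pvGB b 1 q ys = pvGB (max b 1) 1 q ys := by rw [h1]
    _ = pvRS b 1 q ys := pvGB_pvRS ys q 1 b
    _ = max b (pvLineBest (q :: ys)) := pvRS_eq_lineBest q ys b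

-- B's inner h-scan computes pvGB
theorem pvHScan_gB (xs : List Int) : ∀ (x h hb : Int),
    (((x :: xs).zip xs).foldl pvHStep (h, hb)).2 = pvGB hb h x xs := by
  induction xs with
  | nil => intro x h hb; simp [pvGB]
  | cons y ys ih =>
    intro x h hb
    rw [List.zip_cons_cons, List.foldl_cons]
    by_cases hy : y = x
    · have e : pvHStep (h, hb) (x, y) = (h + 1, max hb (h + 1)) := by
        simp [pvHStep, hy]
      rw [e, ih, pvGB, if_pos hy]
    · have e : pvHStep (h, hb) (x, y) = (1, max hb 1) := by
        simp [pvHStep, hy]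
      rw [e, ih, pvGB, if_neg hy]

theorem pvHScan_eq (row : List Int) : (pvHScan row).2 = pvLineBest row := by
  cases row with
  | nil => simp [pvHScan, pvLineBest, pvRunLens]
  | cons x xs =>
    have hd : (x :: xs).drop 1 = xs := rfl
    rw [pvHScan, hd, pvHScan_gB, pvGB_one 1 (le_refl 1) x xs]
    have := pvLineBest_ge_one (x :: xs)
    omega

-- max-shift machinery: folds whose steps satisfy f (max b x) a = max x (f b a)
theorem pv_fold_shift {α : Type} (g : Int → α → Int)
    (hg : ∀ b x a, g (max b x) a = max x (g b a)) (L : List α) :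
    ∀ (b x : Int), L.foldl g (max b x) = max x (L.foldl g b) := by
  induction L with
  | nil => intro b x; simp [max_comm]
  | cons a L ih =>
    intro b x
    rw [List.foldl_cons, hg, max_comm x, ih, List.foldl_cons]

theorem pv_fold_shift_list {α : Type} (g : Int → α → Int)
    (hg : ∀ b x a, g (max b x) a = max x (g b a)) (L : List α) :
    ∀ (l : List Int) (s : Int), L.foldl g (l.foldl max s) = l.foldl max (L.foldl g s) := by
  intro l
  induction l with
  | nil => intro s; rfl
  | cons y l ih =>
    intro s
    rw [List.foldl_cons, ih, pv_fold_shift g hg L s y, List.foldl_cons, max_comm]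

theorem pv_shift_app {α : Type} (g : Int → α → Int)
    (hg : ∀ b x a, g (max b x) a = max x (g b a)) (j : α) :
    ∀ (l : List Int) (s : Int), g (l.foldl max s) j = l.foldl max (g s j) := by
  intro l
  induction l with
  | nil => intro s; rfl
  | cons y l ih =>
    intro s
    rw [List.foldl_cons, ih, hg, List.foldl_cons, max_comm]

theorem pv_fold_absorb (g : Int → Nat → Int)
    (hg : ∀ b x a, g (max b x) a = max x (g b a)) (w : Nat → Int) :
    ∀ (J : List Nat) (s : Int),
      J.foldl (fun b j => g (max b (w j)) j) s = J.foldl g ((J.map w).foldl max s) := by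
  intro J
  induction J with
  | nil => intro s; rfl
  | cons j J ih =>
    intro s
    rw [List.foldl_cons, ih, List.map_cons, List.foldl_cons, List.foldl_cons,
      pv_shift_app g hg j (J.map w) (max s (w j)), hg, max_comm]

theorem pv_foldl_id {α : Type} (J : List α) : ∀ s : Int, J.foldl (fun b _ => b) s = s := by
  induction J with
  | nil => intro s; rfl
  | cons a J ih => intro s; rw [List.foldl_cons]; exact ih s

theorem pv_foldl_max_replicate (n : Nat) : ∀ s : Int, 1 ≤ s →
    (List.replicate n (1 : Int)).foldl max s = s := by
  induction n with
  | zero => intro s _; rfl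
  | succ n ih =>
    intro s hs
    rw [List.replicate_succ, List.foldl_cons, max_eq_left hs]
    exact ih s hs

-- B's fold, characterized: row maxima plus one pvGB scan per column
theorem pvF_char (cols : Nat) (rs : List (List Int)) : ∀ (best : Int) (v p : List Int),
    (rs.foldl (pvBStep cols) (best, v, some p)).1
      = (List.range cols).foldl
          (fun b j => pvGB b (v.getD j 0) (p.getD j 0) (rs.map (fun r => r.getD j 0)))
          (rs.foldl (fun b r => max b (pvLineBest r)) best) := by
  induction rs with
  | nil =>
    intro best v p
    simp only [List.foldl_nil, List.map_nil]
    rw [show (fun (b : Int) (j : Nat) => pvGB b (v.getD j 0) (p.getD j 0) []) = fun b _ => b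
      from by funext b j; rfl, pv_foldl_id]
  | cons r rs ih =>
    intro best v p
    have hstep : pvBStep cols (best, v, some p) r
        = (((List.range cols).map
              (fun j => if r.getD j 0 = p.getD j 0 then v.getD j 0 + 1 else 1)).foldl max
            (max best (pvLineBest r)),
           (List.range cols).map
              (fun j => if r.getD j 0 = p.getD j 0 then v.getD j 0 + 1 else 1),
           some r) := by
      simp only [pvBStep, List.foldl_cons, pvHScan_eq]
    set w : Nat → Int := fun j => if r.getD j 0 = p.getD j 0 then v.getD j 0 + 1 else 1 with hw
    rw [List.foldl_cons, hstep, ih]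
    -- replace v'.getD j 0 by w j inside the range fold (j < cols there)
    have hcongr : (List.range cols).foldl
        (fun b j => pvGB b (((List.range cols).map w).getD j 0) (r.getD j 0)
          (rs.map (fun r' => r'.getD j 0)))
        ((rs.foldl (fun b r' => max b (pvLineBest r')) (((List.range cols).map w).foldl max
          (max best (pvLineBest r)))))
        = (List.range cols).foldl
        (fun b j => pvGB b (w j) (r.getD j 0) (rs.map (fun r' => r'.getD j 0)))
        ((rs.foldl (fun b r' => max b (pvLineBest r')) (((List.range cols).map w).foldl max
          (max best (pvLineBest r))))) := by
      apply PySem.List.foldl_congr_mem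
      intro acc j hj
      have hjlt : j < cols := List.mem_range.mp hj
      have : ((List.range cols).map w).getD j 0 = w j := by
        rw [List.getD_eq_getElem?_getD]
        simp [hjlt]
      rw [this]
    rw [hcongr]
    -- move the v' maxima out through the row fold
    have hshift : rs.foldl (fun b r' => max b (pvLineBest r'))
        (((List.range cols).map w).foldl max (max best (pvLineBest r)))
        = ((List.range cols).map w).foldl max
            (rs.foldl (fun b r' => max b (pvLineBest r')) (max best (pvLineBest r))) := by
      exact pv_fold_shift_list _ (by intro b x a; rw [max_right_comm]; exact max_comm _ _) rs _ _
    rw [hshift, ← pv_fold_absorb (fun b j => pvGB b (w j) (r.getD j 0)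
        (rs.map (fun r' => r'.getD j 0))) (by intro b x a; exact pvGB_max _ _ _ _ _) w]
    -- finally: one pvGB step per column
    apply PySem.List.foldl_congr_mem
    intro acc j _
    rw [List.map_cons]
    rw [show pvGB acc (v.getD j 0) (p.getD j 0)
          (r.getD j 0 :: rs.map (fun r' => r'.getD j 0))
        = if r.getD j 0 = p.getD j 0
          then pvGB (max acc (v.getD j 0 + 1)) (v.getD j 0 + 1) (r.getD j 0)
            (rs.map (fun r' => r'.getD j 0))
          else pvGB (max acc 1) 1 (r.getD j 0) (rs.map (fun r' => r'.getD j 0))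
      from rfl]
    simp only [hw]
    split_ifs <;> rfl

-- pvGB with count 1 along a fold of starts ≥ 1 is a max with the column's best
theorem pv_range_gB_congr (q : Nat → Int) (ys : Nat → List Int) :
    ∀ (J : List Nat) (b : Int), 1 ≤ b →
      J.foldl (fun b j => pvGB b 1 (q j) (ys j)) b
        = J.foldl (fun b j => max b (pvLineBest (q j :: ys j))) b := by
  intro J
  induction J with
  | nil => intro b _; rfl
  | cons j J ih =>
    intro b hb
    rw [List.foldl_cons, List.foldl_cons, pvGB_one b hb]
    exact ih _ (le_trans hb (le_max_left _ _))

-- the row fold only grows its accumulator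
theorem pv_le_foldl_max_row (rs : List (List Int)) : ∀ s : Int,
    s ≤ rs.foldl (fun b r => max b (pvLineBest r)) s := by
  induction rs with
  | nil => intro s; exact le_refl s
  | cons r rs ih => intro s; exact le_trans (le_max_left _ _) (ih (max s (pvLineBest r)))

-- common normal form of both ports on a non-empty board
theorem pv_alt_char (r0 : List Int) (rs : List (List Int)) :
    count_max_candies_alt (r0 :: rs)
      = (List.range r0.length).foldl
          (fun b j => max b (pvLineBest ((r0 :: rs).map (fun row => row.getD j 0))))
          (rs.foldl (fun b r => max b (pvLineBest r)) (pvLineBest r0)) := by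
  have h1 : (1 : Int) ≤ pvLineBest r0 := pvLineBest_ge_one r0
  have hfirst : pvBStep r0.length (1, List.replicate r0.length 0, none) r0
      = (pvLineBest r0, List.replicate r0.length 1, some r0) := by
    simp only [pvBStep, List.foldl_cons, pvHScan_eq]
    rw [max_eq_right h1, pv_foldl_max_replicate r0.length (pvLineBest r0) h1]
  simp only [count_max_candies_alt, PySem.List.pyGetD_zero_cons, List.foldl_cons, hfirst]
  rw [pvF_char]
  have hrep : (List.range r0.length).foldl
      (fun b j => pvGB b ((List.replicate r0.length (1 : Int)).getD j 0) (r0.getD j 0)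
        (rs.map (fun r => r.getD j 0)))
      (rs.foldl (fun b r => max b (pvLineBest r)) (pvLineBest r0))
      = (List.range r0.length).foldl
      (fun b j => pvGB b 1 (r0.getD j 0) (rs.map (fun r => r.getD j 0)))
      (rs.foldl (fun b r => max b (pvLineBest r)) (pvLineBest r0)) := by
    apply PySem.List.foldl_congr_mem
    intro acc j hj
    have hjlt : j < r0.length := List.mem_range.mp hj
    rw [List.getD_eq_getElem?_getD]
    simp [hjlt]
  rw [hrep, pv_range_gB_congr (fun j => r0.getD j 0) (fun j => rs.map (fun r => r.getD j 0))
      (List.range r0.length) _ (le_trans h1 (pv_le_foldl_max_row rs (pvLineBest r0)))]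
  apply PySem.List.foldl_congr_mem
  intro acc j _
  rw [List.map_cons]

-- the index pairs A visits are exactly the adjacent pairs of the line
theorem pv_map_range_zip (xs : List Int) : ∀ (x : Int),
    (List.range xs.length).map (fun k => ((x :: xs).getD k 0, xs.getD k 0)) = (x :: xs).zip xs := by
  induction xs with
  | nil => intro x; simp
  | cons y ys ih =>
    intro x
    rw [List.length_cons, List.range_succ_eq_map, List.map_cons, List.map_map]
    simp only [Function.comp_def, List.getD_cons_succ, List.getD_cons_zero, Nat.succ_eq_add_one]
    rw [List.zip_cons_cons]
    congr 1
    exact ih y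

theorem pv_pairs_eq_zip (xs : List Int) (x : Int) :
    (PySem.List.pyRange 1 ((x :: xs).length : Int) 1).map
      (fun i => (PySem.List.pyGetD (x :: xs) (i - 1) 0, PySem.List.pyGetD (x :: xs) i 0))
      = (x :: xs).zip xs := by
  rw [PySem.List.pyRange_one, List.map_map]
  have hlen : (((x :: xs).length : Int) - 1).toNat = xs.length := by simp
  rw [hlen]
  have hf : ((fun i => (PySem.List.pyGetD (x :: xs) (i - 1) 0, PySem.List.pyGetD (x :: xs) i 0)) ∘
      fun k : Nat => (1 : Int) + ↑k) = fun k => ((x :: xs).getD k 0, xs.getD k 0) := by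
    funext k
    simp only [Function.comp_apply]
    have h2 : (1 : Int) + (k : Int) - 1 = ((k : Nat) : Int) := by omega
    have h1 : (1 : Int) + (k : Int) = ((k + 1 : Nat) : Int) := by omega
    rw [h2, h1, PySem.List.pyGetD_natCast, PySem.List.pyGetD_natCast, List.getD_cons_succ]
  rw [hf, pv_map_range_zip]

-- fold over adjacent pairs computes pvRS
theorem pv_zip_fold (xs : List Int) : ∀ (x mc c : Int),
    max (((x :: xs).zip xs).foldl
        (fun (s : Int × Int) (p : Int × Int) =>
          if p.2 = p.1 then (s.1, s.2 + 1) else (max s.1 s.2, 1)) (mc, c)).1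
      (((x :: xs).zip xs).foldl
        (fun (s : Int × Int) (p : Int × Int) =>
          if p.2 = p.1 then (s.1, s.2 + 1) else (max s.1 s.2, 1)) (mc, c)).2
      = pvRS mc c x xs := by
  induction xs with
  | nil => intro x mc c; simp [pvRS]
  | cons y ys ih =>
    intro x mc c
    have hstep : (if ((x, y) : Int × Int).2 = ((x, y) : Int × Int).1
        then (((mc, c) : Int × Int).1, ((mc, c) : Int × Int).2 + 1)
        else (max ((mc, c) : Int × Int).1 ((mc, c) : Int × Int).2, 1))
        = if y = x then ((mc, c + 1) : Int × Int) else (max mc c, 1) := rfl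
    rw [List.zip_cons_cons, List.foldl_cons, hstep, pvRS]
    by_cases h : y = x
    · rw [if_pos h, if_pos h]
      exact ih y mc (c + 1)
    · rw [if_neg h, if_neg h]
      exact ih y (max mc c) 1

theorem pvRowScan_eq (mc : Int) (row : List Int) :
    pvRowScan mc row = max mc (pvLineBest row) := by
  cases row with
  | nil => simp [pvRowScan, pvLineBest, pvRunLens, PySem.List.pyRange_one_eq_nil]
  | cons x xs =>
    have : pvRowScan mc (x :: xs) = pvRS mc 1 x xs := by
      rw [← pv_zip_fold xs x mc 1, ← pv_pairs_eq_zip xs x]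
      simp only [pvRowScan, List.foldl_map]
    rw [this, pvRS_eq_lineBest]

-- A's column scan is the row scan of the materialized column
theorem pvColScan_eq (b : List (List Int)) (mc c : Int) :
    pvColScan b mc c = pvRowScan mc (b.map (fun row => PySem.List.pyGetD row c 0)) := by
  have hm : ∀ (i : Int), PySem.List.pyGetD (b.map (fun row => PySem.List.pyGetD row c 0)) i 0
      = PySem.List.pyGetD (PySem.List.pyGetD b i []) c 0 := by
    intro i
    have hd : PySem.List.pyGetD ([] : List Int) c 0 = 0 := by
      simp [PySem.List.pyGetD, PySem.List.pyGet?]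
    have h := PySem.List.pyGetD_map (fun row => PySem.List.pyGetD row c 0) b i []
    rwa [hd] at h
  have hbody : (fun (s : Int × Int) r =>
      if PySem.List.pyGetD (PySem.List.pyGetD b r []) c 0
         = PySem.List.pyGetD (PySem.List.pyGetD b (r - 1) []) c 0
      then (s.1, s.2 + 1)
      else (max s.1 s.2, 1))
      = (fun (s : Int × Int) i =>
      if PySem.List.pyGetD (b.map (fun row => PySem.List.pyGetD row c 0)) i 0
         = PySem.List.pyGetD (b.map (fun row => PySem.List.pyGetD row c 0)) (i - 1) 0
      then (s.1, s.2 + 1)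
      else (max s.1 s.2, 1)) := by
    funext s r
    rw [hm r, hm (r - 1)]
  simp only [pvColScan, pvRowScan, List.length_map, hbody]

theorem pv_a_char (r0 : List Int) (rs : List (List Int)) :
    count_max_candies (r0 :: rs)
      = (List.range r0.length).foldl
          (fun b j => max b (pvLineBest ((r0 :: rs).map (fun row => row.getD j 0))))
          (rs.foldl (fun b r => max b (pvLineBest r)) (pvLineBest r0)) := by
  have hmax : pvRowScan = fun (b : Int) (l : List Int) => max b (pvLineBest l) := by
    funext mc row
    exact pvRowScan_eq mc row
  have hm1 : (r0 :: rs).foldl pvRowScan 0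
      = rs.foldl (fun b r => max b (pvLineBest r)) (pvLineBest r0) := by
    rw [hmax, List.foldl_cons, max_eq_right (le_trans zero_le_one (pvLineBest_ge_one r0))]
  simp only [count_max_candies, PySem.List.pyGetD_zero_cons]
  rw [hm1, PySem.List.pyRange_zero_nat, List.foldl_map]
  apply PySem.List.foldl_congr_mem
  intro acc j _
  rw [pvColScan_eq, pvRowScan_eq]
  have hmap : (r0 :: rs).map (fun row => PySem.List.pyGetD row ((j : Int)) 0)
      = (r0 :: rs).map (fun row => row.getD j 0) := by
    apply List.map_congr_left
    intro row _
    rw [PySem.List.pyGetD_natCast]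
  rw [hmap]

-- ===== VERDICT (by name: the statement is the Claim_ definition above) =====
theorem count_max_candies_spec : Claim_equal_count_max_candies := by
  intro board _ hPre
  obtain ⟨hne, _⟩ := hPre
  unfold Spec_count_max_candies
  cases board with
  | nil => exact absurd rfl hne
  | cons r0 rs => rw [pv_a_char, pv_alt_char]
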